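-- pv_equiv track=rewrite | github.com/yuta346/Exercises-1 | data_structures/stacks_and_queues/1_inorder_to_postorder/solution/solution.py | inorder_to_postorder
-- ===== SOURCE A (Python) =====
-- from collections import deque
--
-- def inorder_to_postorder(exp):
--     arr = []
--     queue = deque()
--     for char in exp:
--         if char not in ['+','*','-','%','/']:
--             arr.append(char)
--         else:
--             queue.append(char)
--     while queue:
--         opr = queue.popleft()
--         arr.append(opr)
--     return "".join(arr)
-- ===== SOURCE B (Python) =====
-- def inorder_to_postorder(exp):
--     return "".join(sorted(exp, key=lambda c: c in {'+', '*', '-', '%', '/'}))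
-- ===== Notes on version B (the rewrite author's own statement) =====
-- stated objective: idiomatic
-- what changed: Replaces the explicit loop with a list-and-deque partition by a single stable sort on a boolean is-operator key, joined into the result.
import Mathlib
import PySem

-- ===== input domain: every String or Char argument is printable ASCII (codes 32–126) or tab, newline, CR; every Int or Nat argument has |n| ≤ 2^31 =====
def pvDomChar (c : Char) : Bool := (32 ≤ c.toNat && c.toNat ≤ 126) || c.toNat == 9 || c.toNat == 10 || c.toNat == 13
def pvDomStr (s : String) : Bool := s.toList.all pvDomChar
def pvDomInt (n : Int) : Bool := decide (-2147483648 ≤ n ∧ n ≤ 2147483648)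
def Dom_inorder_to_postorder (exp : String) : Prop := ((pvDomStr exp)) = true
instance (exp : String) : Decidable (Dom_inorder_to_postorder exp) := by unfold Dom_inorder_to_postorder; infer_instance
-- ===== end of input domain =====

-- ===== PORT A =====
-- B changes: the list/deque partition loop is replaced by one stable sort on a boolean
-- is-operator key (idiomatic one-liner; same result, proved below).

-- drain: the 'while queue:' loop of A (popleft from the queue, append to arr)
def pvDrain (arr : List Char) (queue : List Char) : List Char :=
  match queue with
  | [] => arr
  | opr :: rest => pvDrain (arr ++ [opr]) rest

def inorder_to_postorder (exp : String) : String :=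
  let init : List Char × List Char := ([], [])
  let st := exp.toList.foldl (fun (st : List Char × List Char) (char : Char) =>
    if ¬ (char ∈ (['+', '*', '-', '%', '/'] : List Char)) then
      (st.1 ++ [char], st.2)
    else
      (st.1, st.2 ++ [char])) init
  String.ofList (pvDrain st.1 st.2)

-- ===== PORT B =====
def pvIsOp (c : Char) : Bool := decide (c ∈ (['+', '*', '-', '%', '/'] : List Char))

def inorder_to_postorder_alt (exp : String) : String :=
  String.ofList (PySem.List.sorted exp.toList pvIsOp)

-- ===== PRECONDITION & SPEC =====
def Spec_inorder_to_postorder (exp : String) (out : String) : Prop := out = inorder_to_postorder_alt exp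
instance (exp : String) (out : String) : Decidable (Spec_inorder_to_postorder exp out) := by unfold Spec_inorder_to_postorder; infer_instance

-- ===== CLAIM (what is proved, stated in full; the proofs are below) =====
def Claim_equal_inorder_to_postorder : Prop := ∀ (exp : String), Dom_inorder_to_postorder exp → Spec_inorder_to_postorder exp (inorder_to_postorder exp)

-- ===== LEMMAS AND PROOFS =====

-- insertBy with a boolean key places x after everything it is not-before and before
-- the first element it is before: with all of ns not-after x and all of os after x,
-- x lands exactly between the two blocks.
theorem pv_insertBy_mid (before : Char → Char → Bool) (x : Char) (ns os : List Char)
    (hn : ∀ n ∈ ns, before x n = false) (ho : ∀ o ∈ os, before x o = true) :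
    PySem.List.insertBy before x (ns ++ os) = ns ++ x :: os := by
  induction ns with
  | nil =>
    cases os with
    | nil => rfl
    | cons o os' =>
      simp [PySem.List.insertBy, ho o (by simp)]
  | cons n ns' ih =>
    have hx : before x n = false := hn n (by simp)
    simp only [List.cons_append, PySem.List.insertBy, hx]
    simp [ih (fun m hm => hn m (by simp [hm]))]

-- the fold of insertBy keeps the state partitioned: non-operators, then operators,
-- each block in input order.
theorem pv_sorted_fold_partition (xs ns os : List Char)
    (hn : ∀ n ∈ ns, pvIsOp n = false) (ho : ∀ o ∈ os, pvIsOp o = true) :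
    xs.foldl (fun acc x => PySem.List.insertBy (fun a b => decide (pvIsOp a < pvIsOp b)) x acc)
      (ns ++ os)
    = (ns ++ xs.filter (fun c => !pvIsOp c)) ++ (os ++ xs.filter (fun c => pvIsOp c)) := by
  induction xs generalizing ns os with
  | nil => simp
  | cons x xs' ih =>
    by_cases hx : pvIsOp x = true
    · have hstep : PySem.List.insertBy (fun a b => decide (pvIsOp a < pvIsOp b)) x (ns ++ os)
          = (ns ++ os) ++ [x] := by
        apply PySem.List.insertBy_of_forall_not_before
        intro y hy
        rcases List.mem_append.mp hy with h | h
        · simp [hx, hn y h, Bool.lt_iff]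
        · simp [hx, ho y h]
      have := ih ns (os ++ [x]) hn (by
        intro o hoo; rcases List.mem_append.mp hoo with h | h
        · exact ho o h
        · simp at h; simpa [h] using hx)
      simp only [List.foldl_cons, hstep, List.append_assoc] at this ⊢
      rw [this]
      simp [hx]
    · have hx' : pvIsOp x = false := by simpa using hx
      have hstep : PySem.List.insertBy (fun a b => decide (pvIsOp a < pvIsOp b)) x (ns ++ os)
          = ns ++ x :: os := by
        apply pv_insertBy_mid
        · intro n hnn; simp [hx', hn n hnn]
        · intro o hoo; simp [hx', ho o hoo, Bool.lt_iff]
      have := ih (ns ++ [x]) os (by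
        intro n hnn; rcases List.mem_append.mp hnn with h | h
        · exact hn n h
        · simp at h; simpa [h] using hx') ho
      simp only [List.foldl_cons, hstep] at this ⊢
      have e : ns ++ x :: os = (ns ++ [x]) ++ os := by simp
      rw [e, this]
      simp [hx']

theorem pv_sorted_partition (xs : List Char) :
    PySem.List.sorted xs pvIsOp
      = xs.filter (fun c => !pvIsOp c) ++ xs.filter (fun c => pvIsOp c) := by
  rw [PySem.List.sorted_eq_foldl_insertBy]
  simpa using pv_sorted_fold_partition xs [] [] (by simp) (by simp)

theorem pv_drain_eq (arr queue : List Char) : pvDrain arr queue = arr ++ queue := by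
  induction queue generalizing arr with
  | nil => simp [pvDrain]
  | cons o rest ih => simp [pvDrain, ih]

-- A's fold accumulates exactly the two filters.
theorem pv_afold (xs : List Char) (arr queue : List Char) :
    xs.foldl (fun (st : List Char × List Char) (char : Char) =>
      if ¬ (char ∈ (['+', '*', '-', '%', '/'] : List Char)) then
        (st.1 ++ [char], st.2)
      else
        (st.1, st.2 ++ [char])) (arr, queue)
    = (arr ++ xs.filter (fun c => !pvIsOp c), queue ++ xs.filter (fun c => pvIsOp c)) := by
  induction xs generalizing arr queue with
  | nil => simp
  | cons x xs' ih =>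
    simp only [List.foldl_cons, List.filter_cons]
    by_cases hx : x ∈ (['+', '*', '-', '%', '/'] : List Char)
    · have hb : pvIsOp x = true := by simpa [pvIsOp] using hx
      rw [if_neg (by simp [hx]), ih, hb]
      simp
    · have hb : pvIsOp x = false := by simpa [pvIsOp] using hx
      rw [if_pos (by simp [hx]), ih, hb]
      simp

-- ===== VERDICT (by name: the statement is the Claim_ definition above) =====
theorem inorder_to_postorder_spec : Claim_equal_inorder_to_postorder := by
  intro exp _
  show _ = _
  simp only [inorder_to_postorder, inorder_to_postorder_alt, pv_sorted_partition]
  rw [pv_afold exp.toList [] []]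
  simp [pv_drain_eq]
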